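-- pv_equiv track=rewrite | github.com/MattGuptil/Assignment2 | tachycardic.py | is_tachycardic
-- ===== SOURCE A (Python) =====
-- def is_tachycardic(myString):
--
-- 	Count = 0 ;
-- 	myString = myString.strip()
-- 	myString = myString.lower()
--
-- 	for myChar in myString:
-- 		if myChar == 't' or myChar == 'a' or myChar == 'c' or myChar == 'h' or myChar == 'y' or myChar == 'r' or myChar == 'd':
-- 			Count = Count + 1
--
-- 	if Count >= 9 and Count < 13:
-- 		return True
--
-- 	return False
-- ===== SOURCE B (Python) =====
-- def is_tachycardic(myString):
--     s = myString.strip().lower()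
--     count = sum(s.count(c) for c in 'tachyrd')
--     return 9 <= count < 13
-- ===== Notes on version B (the rewrite author's own statement) =====
-- stated objective: idiomatic
-- what changed: Replaces the explicit per-character loop with its 7-way or-chain by summing str.count over the seven target letters and a chained comparison; equivalent because the seven letters are distinct.
import Mathlib
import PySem

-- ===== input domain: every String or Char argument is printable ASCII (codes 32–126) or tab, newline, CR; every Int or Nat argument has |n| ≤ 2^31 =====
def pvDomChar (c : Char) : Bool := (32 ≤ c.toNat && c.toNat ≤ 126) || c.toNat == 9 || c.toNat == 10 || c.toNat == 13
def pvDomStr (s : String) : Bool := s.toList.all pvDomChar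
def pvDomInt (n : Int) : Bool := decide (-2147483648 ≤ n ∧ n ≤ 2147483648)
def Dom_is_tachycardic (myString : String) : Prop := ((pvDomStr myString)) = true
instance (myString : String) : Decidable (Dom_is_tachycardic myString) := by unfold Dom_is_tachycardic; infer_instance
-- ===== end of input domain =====

-- B replaces A's single character-by-character loop (with a 7-way or-chain test) by summing
-- str.count over the seven target letters — more idiomatic, same O(n) cost.


-- ===== PORT A =====
def is_tachycardic (myString : String) : Bool :=
  let s1 := PySem.Str.strip myString
  let s2 := PySem.Str.lower s1
  let Count : Int := s2.toList.foldl
    (fun Count myChar =>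
      if myChar = 't' ∨ myChar = 'a' ∨ myChar = 'c' ∨ myChar = 'h' ∨ myChar = 'y' ∨ myChar = 'r' ∨ myChar = 'd'
      then Count + 1 else Count) 0
  if Count ≥ 9 ∧ Count < 13 then true else false

-- ===== PORT B =====
def is_tachycardic_alt (myString : String) : Bool :=
  let s := PySem.Str.lower (PySem.Str.strip myString)
  let count : Int := ("tachyrd".toList).foldl
    (fun acc c => acc + (PySem.Str.count s (String.ofList [c]) : Int)) 0
  decide (9 ≤ count ∧ count < 13)

-- ===== PRECONDITION & SPEC =====
def Spec_is_tachycardic (myString : String) (out : Bool) : Prop := out = is_tachycardic_alt myString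
instance (myString : String) (out : Bool) : Decidable (Spec_is_tachycardic myString out) := by unfold Spec_is_tachycardic; infer_instance

-- ===== CLAIM (what is proved, stated in full; the proofs are below) =====
def Claim_equal_is_tachycardic : Prop := ∀ (myString : String), Dom_is_tachycardic myString → Spec_is_tachycardic myString (is_tachycardic myString)

-- ===== LEMMAS AND PROOFS =====

-- Chars.count with a single-character needle is List.count (fuel-indexed helper first).
theorem go_single (c : Char) : ∀ (fuel : Nat) (l : List Char) (acc : Nat),
    l.length ≤ fuel → PySem.Chars.count.go [c] fuel l acc = acc + l.count c := by
  intro fuel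
  induction fuel with
  | zero => intro l acc h; rw [PySem.Chars.count.go.eq_def]; cases l <;> simp_all
  | succ n ih =>
    intro l acc h
    cases l with
    | nil => rw [PySem.Chars.count.go.eq_def]; simp
    | cons x t =>
      rw [PySem.Chars.count.go.eq_def]
      simp only [List.isPrefixOf, List.length_cons] at *
      by_cases hx : c = x
      · subst hx
        simp [ih t (acc + 1) (by omega)]
        omega
      · have hb : (c == x) = false := by simpa using hx
        simp [hb, ih t acc (by omega), Ne.symm hx]

theorem count_single (l : List Char) (c : Char) : PySem.Chars.count l [c] = l.count c := by
  rw [PySem.Chars.count]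
  simp [go_single c l.length l 0 (le_refl _)]

-- The seven target letters are distinct, so the per-letter counts sum to A's countP.
theorem sum_counts (l : List Char) :
    l.countP (fun x => decide (x = 't' ∨ x = 'a' ∨ x = 'c' ∨ x = 'h' ∨ x = 'y' ∨ x = 'r' ∨ x = 'd'))
    = l.count 't' + l.count 'a' + l.count 'c' + l.count 'h' + l.count 'y' + l.count 'r' + l.count 'd' := by
  induction l with
  | nil => simp
  | cons x t ih =>
    simp only [List.countP_cons, List.count_cons, ih]
    by_cases h : x = 't' ∨ x = 'a' ∨ x = 'c' ∨ x = 'h' ∨ x = 'y' ∨ x = 'r' ∨ x = 'd'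
    · rcases h with h | h | h | h | h | h | h <;> subst h <;> simp <;> omega
    · push Not at h
      obtain ⟨h1, h2, h3, h4, h5, h6, h7⟩ := h
      simp [h1, h2, h3, h4, h5, h6, h7]

-- ===== VERDICT (by name: the statement is the Claim_ definition above) =====
theorem is_tachycardic_spec : Claim_equal_is_tachycardic := by
  intro s _
  unfold Spec_is_tachycardic is_tachycardic is_tachycardic_alt
  simp only []
  set l := (PySem.Str.lower (PySem.Str.strip s)).toList with hl
  have hA : l.foldl
      (fun Count myChar =>
        if myChar = 't' ∨ myChar = 'a' ∨ myChar = 'c' ∨ myChar = 'h' ∨ myChar = 'y' ∨ myChar = 'r' ∨ myChar = 'd'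
        then Count + 1 else Count) (0 : Int)
      = ((l.countP (fun x => decide (x = 't' ∨ x = 'a' ∨ x = 'c' ∨ x = 'h' ∨ x = 'y' ∨ x = 'r' ∨ x = 'd'))) : Int) := by
    rw [PySem.List.foldl_ite_add_one]
    omega
  have htl : "tachyrd".toList = ['t', 'a', 'c', 'h', 'y', 'r', 'd'] := rfl
  have hc : ∀ c : Char, (PySem.Str.count (PySem.Str.lower (PySem.Str.strip s)) (String.ofList [c]) : Int)
      = (l.count c : Int) := by
    intro c
    rw [PySem.Str.count_eq]
    have : (String.ofList [c]).toList = [c] := by simp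
    rw [this, ← hl, count_single]
  rw [hA, htl]
  simp only [List.foldl, hc]
  have := sum_counts l
  by_cases hcond : 9 ≤ (0 : Int) + (l.count 't' : Int) + l.count 'a' + l.count 'c' + l.count 'h' + l.count 'y' + l.count 'r' + l.count 'd'
    ∧ (0 : Int) + (l.count 't' : Int) + l.count 'a' + l.count 'c' + l.count 'h' + l.count 'y' + l.count 'r' + l.count 'd' < 13
  · rw [if_pos, decide_eq_true hcond]
    constructor <;> omega
  · rw [if_neg, decide_eq_false hcond]
    intro ⟨h1, h2⟩
    apply hcond
    constructor <;> omega
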